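-- pv_equiv track=rewrite | github.com/hikg123/PY_Inspection_Algorithm | accelerationCal.py | findLeftBound
-- ===== SOURCE A (Python) =====
-- def findLeftBound(num, target):  # 查找到最后一个数都没有找到target，则left和right会交错，出现left>right，说明left为要找的数在该序列的上限索引
--     left = 0
--     right = len(num) - 1
--     while (left <= right):
--         mid = (left + right) // 2
--         if num[mid] == target:
--             return mid
--         elif num[mid] > target:
--             right = mid - 1
--         else:
--             left = mid + 1
--     return left  # 要找的数在该序列的上限索引
-- ===== SOURCE B (Python) =====
-- # B: binary search on list segments (slices) with a base offset, instead of A's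
-- # index-pair while loop.  The probed element is always the same as A's (the
-- # relative midpoint (len(seg)-1)//2 of the segment [left..right] equals A's
-- # (left+right)//2 shifted by the offset), so results match on every input.
-- def findLeftBound(num, target):
--     def go(seg, base):
--         if not seg:
--             return base          # insertion bound
--         m = (len(seg) - 1) // 2
--         v = seg[m]
--         if v == target:
--             return base + m
--         if v > target:
--             return go(seg[:m], base)
--         return go(seg[m+1:], base + m + 1)
--     return go(num, 0)
-- ===== Notes on version B (the rewrite author's own statement) =====
-- stated objective: alternative
-- what changed: Instead of A's while loop over an (left,right) index pair into the whole list, B recurses on list segments: it slices out the half to keep and carries a base offset, probing the segment's relative midpoint (len(seg)-1)//2, which coincides with A's probe sequence.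
import Mathlib
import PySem

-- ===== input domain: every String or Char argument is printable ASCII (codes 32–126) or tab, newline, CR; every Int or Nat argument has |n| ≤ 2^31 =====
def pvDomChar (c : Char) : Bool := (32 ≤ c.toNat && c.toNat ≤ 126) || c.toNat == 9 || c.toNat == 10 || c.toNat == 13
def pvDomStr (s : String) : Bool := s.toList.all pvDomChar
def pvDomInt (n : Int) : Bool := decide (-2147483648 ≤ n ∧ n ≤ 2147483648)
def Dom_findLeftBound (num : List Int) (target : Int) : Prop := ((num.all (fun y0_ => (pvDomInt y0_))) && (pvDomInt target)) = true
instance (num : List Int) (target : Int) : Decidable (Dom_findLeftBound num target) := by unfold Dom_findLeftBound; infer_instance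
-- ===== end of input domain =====

-- B replaces A's (left,right)-index while loop by recursion on list segments:
-- it slices out the kept half and carries a base offset; same probe sequence, same results.


-- ===== PORT A =====
-- A's while loop, as structural recursion on the shrinking interval;
-- num[mid] is always in range here (0 ≤ left ≤ mid ≤ right < len), so `.getD 0` is unreachable
def findLeftBoundLoop (num : List Int) (target left right : Int) : Int :=
  if _h : left ≤ right then
    let mid := PySem.Int.floordiv (left + right) 2
    let v := (PySem.List.pyGet? num mid).getD 0
    if v = target then mid
    else if v > target then findLeftBoundLoop num target left (mid - 1)
    else findLeftBoundLoop num target (mid + 1) right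
  else left
termination_by (right + 1 - left).toNat
decreasing_by
  · have := PySem.Int.floordiv_two_mid_bounds _h
    omega
  · have := PySem.Int.floordiv_two_mid_bounds _h
    omega

def findLeftBound (num : List Int) (target : Int) : Int :=
  findLeftBoundLoop num target 0 ((num.length : Int) - 1)

-- ===== PORT B =====
-- B's helper go(seg, base): recursion on the segment (a sublist) with its base offset.
-- seg[m] with 0 ≤ m < len(seg) is exactly getD; seg[:m] / seg[m+1:] with these
-- nonnegative in-range bounds are exactly List.take m / List.drop (m+1).
def goSeg (target : Int) (seg : List Int) (base : Int) : Int :=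
  if seg = [] then base
  else
    let m : Nat := (seg.length - 1) / 2
    let v := seg.getD m 0
    if v = target then base + m
    else if v > target then goSeg target (seg.take m) base
    else goSeg target (seg.drop (m + 1)) (base + m + 1)
termination_by seg.length
decreasing_by
  all_goals
    have hpos : 0 < seg.length := List.length_pos_of_ne_nil (by assumption)
    simp [List.length_take]
    omega

def findLeftBound_alt (num : List Int) (target : Int) : Int :=
  goSeg target num 0

-- ===== PRECONDITION & SPEC =====
def Spec_findLeftBound (num : List Int) (target : Int) (out : Int) : Prop := out = findLeftBound_alt num target
instance (num : List Int) (target : Int) (out : Int) : Decidable (Spec_findLeftBound num target out) := by unfold Spec_findLeftBound; infer_instance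

-- ===== CLAIM (what is proved, stated in full; the proofs are below) =====
def Claim_equal_findLeftBound : Prop := ∀ (num : List Int) (target : Int), Dom_findLeftBound num target → Spec_findLeftBound num target (findLeftBound num target)

-- ===== LEMMAS AND PROOFS =====
theorem loop_eq_go (num : List Int) (target : Int) :
    ∀ (L : Nat) (seg : List Int) (l : Nat), seg.length = L → l + L ≤ num.length →
      seg = (num.drop l).take L →
      findLeftBoundLoop num target (l : Int) ((l : Int) + L - 1) = goSeg target seg (l : Int) := by
  intro L
  induction L using Nat.strong_induction_on with
  | _ L IH =>
    intro seg l hlen hle hseg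
    rcases Nat.eq_zero_or_pos L with hL0 | hLpos
    · subst hL0
      have hnil : seg = [] := List.length_eq_zero_iff.mp hlen
      subst hnil
      rw [findLeftBoundLoop, goSeg]
      simp
    · have hne : seg ≠ [] := by
        intro h; subst h; simp at hlen; omega
      obtain ⟨m, hmdef⟩ : ∃ m, m = (L - 1) / 2 := ⟨_, rfl⟩
      have hmL : m < L := by omega
      have hmid : PySem.Int.floordiv ((l : Int) + ((l : Int) + (L : Int) - 1)) 2 = ((l + m : Nat) : Int) := by
        rw [PySem.Int.floordiv_eq_ediv_of_pos (by omega)]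
        push_cast [hmdef]
        omega
      have hget : (PySem.List.pyGet? num ((l + m : Nat) : Int)).getD 0 = seg.getD m 0 := by
        rw [PySem.List.pyGet?_natCast]
        have h2 : seg[m]? = num[l + m]? := by
          rw [hseg, List.getElem?_take_of_lt (by omega), List.getElem?_drop]
        simp [List.getD, h2]
      have hloop : findLeftBoundLoop num target (l : Int) ((l : Int) + L - 1)
          = (if seg.getD m 0 = target then ((l + m : Nat) : Int)
             else if seg.getD m 0 > target then findLeftBoundLoop num target (l : Int) (((l + m : Nat) : Int) - 1)
             else findLeftBoundLoop num target (((l + m : Nat) : Int) + 1) ((l : Int) + L - 1)) := by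
        rw [findLeftBoundLoop, dif_pos (by omega : (l : Int) ≤ (l : Int) + (L : Int) - 1)]
        simp only [hmid, hget]
      have hgo : goSeg target seg (l : Int)
          = (if seg.getD m 0 = target then ((l : Int) + (m : Int))
             else if seg.getD m 0 > target then goSeg target (seg.take m) (l : Int)
             else goSeg target (seg.drop (m + 1)) ((l : Int) + (m : Int) + 1)) := by
        rw [goSeg, if_neg hne]
        simp only [hlen, ← hmdef]
      rw [hloop, hgo]
      by_cases hv1 : seg.getD m 0 = target
      · rw [if_pos hv1, if_pos hv1]
        push_cast; ring
      · rw [if_neg hv1, if_neg hv1]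
        by_cases hv2 : seg.getD m 0 > target
        · rw [if_pos hv2, if_pos hv2]
          have hrec := IH m hmL (seg.take m) l
            (by simp [List.length_take]; omega) (by omega)
            (by rw [hseg, List.take_take]; congr 1; omega)
          have h1 : (((l + m : Nat) : Int) - 1) = (l : Int) + (m : Int) - 1 := by push_cast; ring
          rw [h1, hrec]
        · rw [if_neg hv2, if_neg hv2]
          have hrec := IH (L - (m + 1)) (by omega) (seg.drop (m + 1)) (l + (m + 1))
            (by simp [hlen]) (by omega)
            (by rw [hseg, List.drop_take, List.drop_drop])
          have h1 : (((l + m : Nat) : Int) + 1) = ((l + (m + 1) : Nat) : Int) := by push_cast; ring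
          have h2 : ((l : Int) + L - 1) = ((l + (m + 1) : Nat) : Int) + ((L - (m + 1) : Nat) : Int) - 1 := by
            push_cast; omega
          rw [h1, h2, hrec]
          congr 1

-- ===== VERDICT (by name: the statement is the Claim_ definition above) =====
theorem findLeftBound_spec : Claim_equal_findLeftBound := by
  intro num target _
  unfold Spec_findLeftBound findLeftBound findLeftBound_alt
  have := loop_eq_go num target num.length num 0 rfl (by omega) (by simp)
  simpa using this
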